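/- GENERATED by mk_final_copies.py from the proof of the farm's unit `start_decoder.R16b` (farm:start_decoder.R16b.1: Proof.lean) as the
   re-elaboration sweep compiled it — do not edit. -/
import Asan.CheckWalk
import Vorbis.Spec.Reader
import Vorbis.Spec.Units.start_decoder_R16b

open X86 X86.User Asan Vorbis Vorbis.Spec Vorbis.Spec.StartDecoder

set_option maxRecDepth 4000
set_option maxHeartbeats 4000000

namespace Vorbis.Spec.start_decoder_R16b

/-- **Segment R16b of `start_decoder`** (`cut320` 0x116680 … 0x1166bf, returns into `cut321` 0x1166c4; stb_vorbis_fixed.c:4159–4160):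
the result of `setup_malloc(f, 4·blocksize_1)` is spilled to `[R + 10H]`, `rbx = i`, `r12 = i + 6CH`, `r13 = &f->channel_buffers[i]`;
check site 0x116697 (store8 at `f + 872 + 8·i`, `i < 16`: inside `*f`), the store 0x1166a1; check site 0x1166a9 (load4 at `f + 156`);
`setup_malloc(f, (4·blocksize_1) >> 1)` with its precondition `ArenaPre`. At the return: `Frame`'s and `Mid`'s memory parts at the
call state by `FInv.carry` / `Mid.carry_spill` (two pushed return addresses, the spill, the slot of channel `i`: all `ChanWin g i`),
then ONE lemma per case of the callee's post: `SecPt.alloc_call` (the request fits: the ghost grows) or `SecPt.alloc_fail` (NULL, the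
same ghost); the loop's clauses by `ChanLoop.of_secPt`; `channel_buffers[i]` is read back through the stores (`u_read`) and through
the allocator's footprint (`ChanWin.fields_same` with `i + 1`), its `PendR16` is the entry's `p1` (`PendR16.mono`). -/
theorem segR16b_walk {Lay : Layout} (hLay : Lay.hi = 0x1000000) {μ : Microarch} (hμ : UserX.MicroOK μ) {u₀ : State}
    (hcode : HasCodeNat Lay u₀ Vorbis.L.start_decoder.entry Vorbis.Code.code_start_decoder.nat Vorbis.L.start_decoder.size)
    (hload4 : Asan.SmallCheck Lay μ Vorbis.WayInv (Vorbis.CodeOK u₀) [.rax, .rcx, .rdx] 4 Vorbis.L.__asan_load4_noabort.entry)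
    (h_setup_malloc : ∀ (others : List Obj) (frames : List (Nat × FrameLayout)) (A : Arena),
      Calls Lay μ Vorbis.WayInv (Vorbis.conv u₀) Vorbis.L.setup_malloc.entry (Vorbis.Spec.setup_malloc.spec others frames A))
    (hstore8 : Asan.SmallCheck Lay μ Vorbis.WayInv (Vorbis.CodeOK u₀) [.rax, .rcx, .rdx] 8 Vorbis.L.__asan_store8_noabort.entry)
    {g : Ghost} {i : Nat} {v : State} {A9 : Arena} {A : Arena × List Obj} (hb : BodyR16a u₀ g i A9 A v) :
    ReachVia Lay μ WayInv v (fun w => AtR16b u₀ g i w) := by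
  have hl := hb.loop
  have hpt := hl.secPt
  have hfr := hpt.frame
  have hh := hpt.hand
  have hm := hpt.mid
  have hp : Pos g A := hpt.pos
  have he := hfr.entry
  v_entry he
  obtain ⟨hRa, hR8⟩ := hfr.r_eq
  simp only [steady, Ghost.RA] at hRa
  simp only [depth] at he_room he_stack
  have hflo := hp.f_lo
  have hf2 := hp.f_hi
  have hf3 := hp.f_stack
  simp only [Ghost.RA] at hf3
  have hRn : (addr g.R).toNat = g.R := toNat_addr _ (by omega)
  have hfn : (addr g.f).toNat = g.f := toNat_addr _ (by omega)
  have w_rip := hfr.rip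
  have c_rsp := hfr.rsp
  have c_rbp := hpt.rbp
  have c_r14 : v.reg .r14 = UInt64.ofNat i := hl.r14
  have c_r15 := hb.r15
  have w_eq : Mem.EqOn Vorbis.L.textLo Vorbis.L.textHi u₀.mem v.mem := hfr.code
  have hdf : v.flags .df = false := (show abiInv _ from hfr.inv).1
  have hmx : v.mxcsr &&& 0x1F80 = 0x1F80 := (show abiInv _ from hfr.inv).2
  have hsse := Vorbis.sseOK_of_abiInv hfr.inv
  have hsm := h_setup_malloc A.2 g.frames' A.1
  have hlt := hb.lt
  have hhd := hm.header.HD1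
  have hile := hl.i_le
  have hi16 : i < 16 := by omega
  have hin : (UInt64.ofNat i).toNat = i := by
    rw [UInt64.toNat_ofNat']
    omega
  -- the address of `channel_buffers[i]`, as `lea r13, [rbp + rbx*8 + 368H]` and as `[rbp + r12*8 + 8]` compute it
  have hslot13 : addr g.f + UInt64.ofNat i * 8 + 872 = addr (g.f + 872 + 8 * i) := by
    apply UInt64.toNat_inj.mp
    rw [toNat_addr _ (by omega)]
    u_omega
  have hslot12 : addr g.f + (UInt64.ofNat i + 108) * 8 + 8 = addr (g.f + 872 + 8 * i) := by
    apply UInt64.toNat_inj.mp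
    rw [toNat_addr _ (by omega)]
    u_omega
  have hslotn : (addr (g.f + 872 + 8 * i)).toNat = g.f + 872 + 8 * i := toNat_addr _ (by omega)
  u_walk hcode [hμ.vendor, cnt32_sext i (by omega), hslot13, hslot12] until [Vorbis.L.start_decoder.cut321] span [Vorbis.L.textLo, Vorbis.L.textHi] side (v_side)
  case check_116697 =>
    -- 0x116697: the store of `f->channel_buffers[i]` (f + 872 + 8·i, i < 16) lies inside `*f`
    have hun : ShadowUntouched v.mem s_116697.mem := by v_untouched
    refine (hh.obj.mono (frames'_sub g A.2)).accSmall hfr.shadow hun _ 8 (by decide) (by u_omega) ?_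
    simp only [Off.sizeof.stb_vorbis]
    u_omega
  case check_1166a9 =>
    -- 0x1166a9: the load of `f->blocksize_1` (f + 156)
    have hun : ShadowUntouched v.mem s_1166a9.mem := by v_untouched
    have hb1n : (addr (g.f + 156)).toNat = g.f + 156 := toNat_addr _ (by omega)
    refine (hh.obj.mono (frames'_sub g A.2)).accSmall hfr.shadow hun _ 4 (by decide) (by u_omega) ?_
    simp only [Off.sizeof.stb_vorbis]
    u_omega
  case call_inv => v_inv
  case pre_1166bf =>
    -- 0x1166bf: `setup_malloc(f, 2·blocksize_1)`: `*f` live, the arena layer over the own stores (none meets `[f + 112, f + 136)`)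
    have hun : ShadowUntouched v.mem s_1166bf.mem := by v_untouched
    have hs : Mem.SameExcept [⟨g.R - 8, g.R⟩, ⟨g.R + 16, g.R + 24⟩, ⟨g.f + 872 + 8 * i, g.f + 880 + 8 * i⟩]
        v.mem s_1166bf.mem := by u_same
    refine ⟨shadowPre_call hfr (by rw [w_rsp]; u_omega) hun, ?_, ?_, hh.arenaText⟩
    · rw [w_rdi, hfn]
      exact (hh.obj.mono (frames'_sub g A.2)).blockLive
    · rw [w_rdi, hfn]
      apply hm.arena.frame (by simp only [Off.sizeof.stb_vorbis]; omega)
      apply hs.eqOn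
      intro w hw
      simp only [List.mem_cons, List.mem_nil_iff, or_false] at hw
      rcases hw with rfl | rfl | rfl
      · simp only [voff]
        omega
      · simp only [voff]
        omega
      · simp only [voff]
        omega
  -- the returned state (0x1166c4): the facts about the call state `s_1166bf`
  have hsp : (s_1166bf.reg .rsp).toNat + 8 = g.R := by
    rw [w_rsp_1166bf]
    u_omega
  have hrdi : (s_1166bf.reg .rdi).toNat = g.f := by
    rw [w_rdi_1166bf]
    exact hfn
  -- the request: `(4 · blocksize_1) >> 1 = 2 · blocksize_1` (HD3: 64 ≤ blocksize_1 ≤ 8192, no wrap)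
  obtain ⟨hb0, hb01, hb1⟩ := hm.header.HD3.range
  have hraw : stb_vorbis.blocksize_1 v.mem g.f = sint32 (v.mem.readLE (addr g.f + 156) 4) := by
    simp only [vacc, voff]
    rw [Mem.i32_def]
    unfold Mem.u32
    rw [← addr_add_lit]
  have hrlt := Mem.readLE_lt' v.mem (addr g.f + 156) 4
  have hcases := sint32_cases (v.mem.readLE (addr g.f + 156) 4)
  have hbs : bsize v.mem g.f 1 = v.mem.readLE (addr g.f + 156) 4 := by
    rw [bsize_one, hraw]
    omega
  have hbs_hi : v.mem.readLE (addr g.f + 156) 4 ≤ 8192 := by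
    rw [hraw] at hb1
    omega
  have hn : (s_1166bf.reg .rsi).toNat % 2 ^ 32 = 2 * bsize v.mem g.f 1 := by
    have e2 : (2 : UInt64).toNat % 64 = 2 := by decide
    have e1 : (1 : UInt64).toNat % 64 = 1 := by decide
    rw [w_rsi_1166bf, cnt32_sext_bv _ (by omega), UInt64.toNat_shiftRight, UInt64.toNat_shiftLeft, UInt64.toNat_ofNat', e2, e1,
      Nat.shiftLeft_eq, Nat.shiftRight_eq_div_pow, hbs]
    omega
  -- `Frame`'s and `Mid`'s memory parts at the call state: two pushed return addresses, the spill, the slot of channel `i`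
  have hun0 : ShadowUntouched v.mem s_1166bf.mem := by v_untouched
  have hs0 : Mem.SameExcept [⟨g.R - 8, g.R⟩, ⟨g.R + 16, g.R + 24⟩, ⟨g.f + 872 + 8 * i, g.f + 880 + 8 * i⟩]
      v.mem s_1166bf.mem := by u_same
  have hws0 : ∀ w, w ∈ [(⟨g.R - 8, g.R⟩ : Span), ⟨g.R + 16, g.R + 24⟩, ⟨g.f + 872 + 8 * i, g.f + 880 + 8 * i⟩] →
      ChanWin g i A9 A w := by
    intro w hw
    simp only [List.mem_cons, List.mem_nil_iff, or_false] at hw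
    unfold ChanWin
    rcases hw with rfl | rfl | rfl
    · left
      simp only []
      omega
    · right
      left
      simp only []
      omega
    · right
      right
      right
      right
      right
      right
      left
      simp only []
      omega
  have hbits0 : Bits (g.Blk A) g.len s_1166bf.mem g.f := by
    apply bits_kept hp hm.bits hs0
    intro w hw
    simp only [List.mem_cons, List.mem_nil_iff, or_false] at hw
    rcases hw with rfl | rfl | rfl
    · left
      simp only []
      omega
    · left
      simp only []
      omega
    · right
      right
      left
      simp only []
      omega
  have hf1 : FInv g A s_1166bf.mem := (FInv.of hfr).carry hp hs0 hun0 (fun w hw => (hws0 w hw).secWin)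
  have hm1 : Mid g 9 9 10 A9 A s_1166bf.mem :=
    hm.carry_spill hp hs0 hun0 (fun w hw => (hws0 w hw).midWin) hbits0 (ChanWin.consts_same hp hm.consts hs0 hws0)
  -- the callee's footprint, in the callee's terms
  have hsame := w_same
  simp only [X86.User.Spec.footprint, vspec] at hsame
  have hspn : (s_1166bf.reg .rsp).toNat = g.R - 8 := by omega
  have a1 := hm.arena.AR1
  have a2 := hm.arena.AR2
  have hcodeOK : CodeOK u₀ s_1166bfr.mem := Vorbis.conv_code_eqOn w_code
  have hrbp : s_1166bfr.reg .rbp = addr g.f := by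
    rw [w_kept.get .rbp rfl]
    exact c_rbp
  have hr14 : s_1166bfr.reg .r14 = v.reg .r14 := w_kept.get .r14 rfl
  have hrbx : s_1166bfr.reg .rbx = addr i := w_rbx
  have hr12 : s_1166bfr.reg .r12 = addr (i + 0x6c) := by
    rw [w_r12]
    exact addr_add_lit i 108
  have hr13 : s_1166bfr.reg .r13 = addr (g.f + 0x368 + 8 * i) := w_r13
  have hi16' : i ≤ 16 := by omega
  have hi17 : i + 1 ≤ 16 := by omega
  -- the fields the loop reads, and the stored pointer, at the call state
  obtain ⟨e1, e2, e3, e4, e5, e6, e7⟩ := ChanWin.fields_same hp hi16' hs0 (fun x hx => Or.inl (hws0 x hx))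
  have hcb0 : stb_vorbis.channel_buffers s_1166bf.mem g.f i = (v.reg .rax).toNat := by
    simp only [vacc, voff]
    unfold Mem.u64
    rw [w_mem_1166bf]
    u_read
  by_cases hfit : A.1.Fits ((s_1166bf.reg .rsi).toNat % 2 ^ 32)
  · -- the block was allocated: the ghost grows, `Since A.1 …`, hence `Since A9 …`
    obtain ⟨hpt', hrax, _, hsince⟩ :=
      SecPt.alloc_call hfr hh hp hf1 hm1 hsp hrdi hsame w_post hfit w_rip w_rsp hcodeOK w_inv hrbp
    have hwin := allocWins_ok hp hsp hrdi (shadow_win_of_fits hm1.arena hfit)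
    -- the allocator's footprint meets no slot of the channels up to `i` (channel `i` included: its slot was just stored)
    obtain ⟨d1, d2, d3, d4, d5, d6, d7⟩ :=
      ChanWin.fields_same (i := i + 1) (A9 := A9) hp hi17 hsame (fun x hx => Or.inr (hwin x hx))
    rw [hn] at hpt' hsince
    have hext := A.1.extends_pushSetup (2 * bsize v.mem g.f 1)
    have hloop := hl.of_secPt hpt' hext hr14 (d1.trans e1) (d2.trans e2) (d3.trans e3) (d4.trans e4)
      (fun j hj => (d5 j (by omega)).trans (e5 j hj)) (fun j hj => (d6 j (by omega)).trans (e6 j hj))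
      (fun j hj => (d7 j (by omega)).trans (e7 j hj))
    have hbs' : bsize s_1166bfr.mem g.f 1 = bsize v.mem g.f 1 := by
      rw [bsize_one, bsize_one, d2.trans e2]
    have hraxn : (s_1166bfr.reg .rax).toNat = A.1.B + (A.1.S + 32) := by omega
    have hcb : stb_vorbis.channel_buffers s_1166bfr.mem g.f i = (v.reg .rax).toNat :=
      (d5 i (by omega)).trans hcb0
    refine ReachVia.done ⟨A9, _, hloop, ?_, hrbx, hr12, hr13, ?_, Or.inr ?_⟩
    · rw [d1.trans e1]
      exact hlt
    · rw [hcb, hbs']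
      exact hb.p1.mono hext
    · rw [hraxn, hbs']
      exact hsince.older hm.extc
  · -- the request did not fit: NULL, the same ghost
    obtain ⟨hrax, ha', hun, hfail⟩ := w_post.2 hfit
    obtain ⟨hpt', _⟩ := SecPt.alloc_fail hfr hh hp hf1 hm1 hsp hrdi ha' hun hfail w_rip w_rsp hcodeOK w_inv hrbp
    have hwin : ∀ x, x ∈ [(⟨(s_1166bf.reg .rsp).toNat - 80, (s_1166bf.reg .rsp).toNat⟩ : Span),
        ⟨(s_1166bf.reg .rdi).toNat + 8, (s_1166bf.reg .rdi).toNat + 12⟩] → AllocWin g A x := by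
      intro x hx
      simp only [List.mem_cons, List.mem_nil_iff, or_false] at hx
      unfold AllocWin
      rcases hx with rfl | rfl
      · left
        simp only []
        omega
      · right
        left
        simp only []
        omega
    obtain ⟨d1, d2, d3, d4, d5, d6, d7⟩ :=
      ChanWin.fields_same (i := i + 1) (A9 := A9) hp hi17 hfail (fun x hx => Or.inr (hwin x hx))
    have hloop := hl.of_secPt hpt' (Arena.Extends.refl _) hr14 (d1.trans e1) (d2.trans e2) (d3.trans e3) (d4.trans e4)
      (fun j hj => (d5 j (by omega)).trans (e5 j hj)) (fun j hj => (d6 j (by omega)).trans (e6 j hj))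
      (fun j hj => (d7 j (by omega)).trans (e7 j hj))
    have hbs' : bsize s_1166bfr.mem g.f 1 = bsize v.mem g.f 1 := by
      rw [bsize_one, bsize_one, d2.trans e2]
    have hcb : stb_vorbis.channel_buffers s_1166bfr.mem g.f i = (v.reg .rax).toNat :=
      (d5 i (by omega)).trans hcb0
    refine ReachVia.done ⟨A9, A, hloop, ?_, hrbx, hr12, hr13, ?_, Or.inl ?_⟩
    · rw [d1.trans e1]
      exact hlt
    · rw [hcb, hbs']
      exact hb.p1
    · rw [hrax]
      rfl

end Vorbis.Spec.start_decoder_R16b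

/-- The unit `start_decoder.R16b`: `segR16b_walk` at every entry state. -/
theorem Vorbis.Spec.Worked.start_decoder_R16b_ok : Vorbis.Spec.start_decoder_R16b.Statement := by
  intro Lay hLay μ hμ u₀ hcode hload4 h_setup_malloc hstore8 g i v hat
  obtain ⟨A9, A, hb⟩ := hat
  exact Vorbis.Spec.start_decoder_R16b.segR16b_walk hLay hμ hcode hload4 h_setup_malloc hstore8 hb
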